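-- pv_equiv track=rewrite | github.com/BrendanArthurRing/katas | naughty_or_nice.py | naughty_or_nice
-- ===== SOURCE A (Python) =====
-- def naughty_or_nice(actions):
--
--     naughty_letters = ['b', 'f', 'k']
--     nice_letters = ['g', 's', 'n']
--     naughty_actions = []
--     nice_actions = []
--
--     for i in actions:
--     	if i[0] in nice_letters:
--     		nice_actions.append(i[0])
--     	elif i[0] in naughty_letters:
--     		naughty_actions.append(i[0])
--
--     if len(nice_actions) > len(naughty_actions):
--     	return 'nice'
--     elif len(naughty_actions) >= len(nice_actions):
--     	return 'naughty'
-- ===== SOURCE B (Python) =====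
-- def naughty_or_nice(actions):
--     # staged passes: materialize first letters, then six independent count scans
--     firsts = [a[0] for a in actions]
--     nice = sum(firsts.count(c) for c in 'gsn')
--     naughty = sum(firsts.count(c) for c in 'bfk')
--     return 'nice' if nice > naughty else 'naughty'
-- ===== Notes on version B (the rewrite author's own statement) =====
-- stated objective: alternative
-- what changed: Replaces A's single branching loop that filters first letters into two lists compared by length with a branch-free staged pipeline: materialize the list of first letters once, then take six independent list.count scans (three per category) and compare the sums.
import Mathlib
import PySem

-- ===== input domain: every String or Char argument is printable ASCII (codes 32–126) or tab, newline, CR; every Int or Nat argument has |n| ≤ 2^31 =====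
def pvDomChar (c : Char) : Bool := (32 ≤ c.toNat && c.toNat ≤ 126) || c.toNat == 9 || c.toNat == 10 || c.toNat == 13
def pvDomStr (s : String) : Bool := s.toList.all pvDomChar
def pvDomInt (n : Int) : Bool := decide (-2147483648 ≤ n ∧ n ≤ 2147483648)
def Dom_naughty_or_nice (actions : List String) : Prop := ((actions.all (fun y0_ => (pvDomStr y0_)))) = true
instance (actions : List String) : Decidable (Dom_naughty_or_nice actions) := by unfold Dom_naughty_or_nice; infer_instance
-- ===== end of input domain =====

-- B replaces A's branching filter loop (two lists compared by length) with a staged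
-- pipeline: first letters materialized once, then six independent count scans summed.


-- ===== PORT A =====
-- loop body of A: i[0] ∈ nice_letters → append to nice; elif ∈ naughty_letters → append to naughty
def pvStepA (st : List Char × List Char) (i : String) : List Char × List Char :=
  match PySem.Str.pyGet? i 0 with   -- i[0]; none = IndexError (excluded by Pre_)
  | some c =>
      if (['g', 's', 'n'] : List Char).contains c then (st.1 ++ [c], st.2)
      else if (['b', 'f', 'k'] : List Char).contains c then (st.1, st.2 ++ [c])
      else st
  | none => st

def naughty_or_nice (actions : List String) : String :=
  let st := actions.foldl pvStepA ([], [])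
  if st.1.length > st.2.length then "nice"
  else if st.2.length ≥ st.1.length then "naughty"
  else "naughty"   -- Python falls off the end here; this branch is unreachable

-- ===== PORT B =====
-- firsts = [a[0] for a in actions]; the ' ' default is unreachable under Pre_ (a[0] raises there)
def pvFirsts (actions : List String) : List Char :=
  actions.map (fun a => (PySem.Str.pyGet? a 0).getD ' ')

def naughty_or_nice_alt (actions : List String) : String :=
  let firsts := pvFirsts actions
  let nice := ((['g', 's', 'n'] : List Char).map (fun c => PySem.List.count firsts c)).sum
  let naughty := ((['b', 'f', 'k'] : List Char).map (fun c => PySem.List.count firsts c)).sum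
  if nice > naughty then "nice" else "naughty"

-- ===== PRECONDITION & SPEC =====
-- Pre_ excludes exactly the inputs containing an empty string, where the Python A
-- (and B alike) raises IndexError on i[0].
def Pre_naughty_or_nice (actions : List String) : Prop := ∀ a ∈ actions, a ≠ ""
instance (actions : List String) : Decidable (Pre_naughty_or_nice actions) := by
  unfold Pre_naughty_or_nice; infer_instance

def pvWitness_naughty_or_nice : List String := ["give", "steal", "bark"]

def Spec_naughty_or_nice (actions : List String) (out : String) : Prop := out = naughty_or_nice_alt actions
instance (actions : List String) (out : String) : Decidable (Spec_naughty_or_nice actions out) := by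
  unfold Spec_naughty_or_nice; infer_instance

-- ===== CLAIM (what is proved, stated in full; the proofs are below) =====
def Claim_equal_naughty_or_nice : Prop := ∀ (actions : List String), Dom_naughty_or_nice actions → Pre_naughty_or_nice actions → Spec_naughty_or_nice actions (naughty_or_nice actions)

-- ===== LEMMAS AND PROOFS =====

-- invariant: the lengths of A's two lists equal B's per-letter counts over the firsts list
theorem pv_inv (actions : List String) (st : List Char × List Char) :
    ((actions.foldl pvStepA st).1.length =
        st.1.length + (PySem.List.count (pvFirsts actions) 'g'
          + PySem.List.count (pvFirsts actions) 's' + PySem.List.count (pvFirsts actions) 'n')) ∧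
    ((actions.foldl pvStepA st).2.length =
        st.2.length + (PySem.List.count (pvFirsts actions) 'b'
          + PySem.List.count (pvFirsts actions) 'f' + PySem.List.count (pvFirsts actions) 'k')) := by
  induction actions generalizing st with
  | nil => simp [pvFirsts, PySem.List.count_eq]
  | cons a rest ih =>
    simp only [List.foldl_cons]
    obtain ⟨ih1, ih2⟩ := ih (pvStepA st a)
    have hf : pvFirsts (a :: rest) = ((PySem.Str.pyGet? a 0).getD ' ') :: pvFirsts rest := by
      simp [pvFirsts]
    simp only [PySem.List.count_eq] at ih1 ih2
    rw [hf, ih1, ih2]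
    simp only [PySem.List.count_eq, List.count_cons]
    unfold pvStepA
    cases hc : PySem.Str.pyGet? a 0 with
    | none => simp
    | some c =>
      dsimp only [Option.getD]
      by_cases h1 : c = 'g' <;> by_cases h2 : c = 's' <;> by_cases h3 : c = 'n' <;>
        by_cases h4 : c = 'b' <;> by_cases h5 : c = 'f' <;> by_cases h6 : c = 'k' <;>
        simp_all <;> omega

-- ===== VERDICT (by name: the statement is the Claim_ definition above) =====
theorem naughty_or_nice_spec : Claim_equal_naughty_or_nice := by
  intro actions _ _
  unfold Spec_naughty_or_nice naughty_or_nice naughty_or_nice_alt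
  obtain ⟨h1, h2⟩ := pv_inv actions ([], [])
  simp only [List.length_nil, Nat.zero_add] at h1 h2
  simp only [List.map_cons, List.map_nil, List.sum_cons, List.sum_nil]
  simp only [gt_iff_lt]
  split_ifs <;> first | rfl | (exfalso; omega)
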